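-- pv_equiv track=rewrite | github.com/sarthmit/dist_sharpening | 3rdparty/Automodel-workspace/Automodel/nemo_automodel/components/distributed/pipelining/functional.py | generate_hf_model_fqn_per_model_part
-- ===== SOURCE A (Python) =====
-- def generate_hf_model_fqn_per_model_part(
--     num_stages: int,
--     num_layers: int,
--     include_embeddings: bool = True,
--     include_lm_head: bool = True,
--     include_rotary_emb: bool = True,
--     fqn_prefix: str = "model.",
-- ) -> list[list[str]]:
--     """
--     Generates module names for each pipeline stage for HuggingFace models.
--
--     Args:
--         num_stages: Number of pipeline stages
--         num_layers: Total number of transformer layers in the model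
--         include_embeddings: Whether to include embedding layer in first stage
--         include_lm_head: Whether to include lm_head in last stage (for CausalLM models)
--
--     Returns:
--         List of lists containing module names for each stage
--
--     Example:
--         generate_hf_model_split(4, 32) might return:
--         [
--             ["model.embed_tokens", "model.layers.0", ..., "model.layers.7"],
--             ["model.layers.8", ..., "model.layers.15"],
--             ["model.layers.16", ..., "model.layers.23"],
--             ["model.layers.24", ..., "model.layers.31", "model.norm", "lm_head"]
--         ]
--     """
--     if num_stages < 1:
--         raise ValueError("Number of stages must be at least 1")
--
--     if num_stages > num_layers:
--         raise ValueError(f"Number of stages ({num_stages}) cannot exceed number of layers ({num_layers})")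
--
--     # Calculate base layers per stage and remainder
--     layers_per_stage = num_layers // num_stages
--     extra_layers = num_layers % num_stages
--
--     module_names_per_stage = []
--     current_layer = 0
--
--     for stage_idx in range(num_stages):
--         stage_modules = []
--
--         # Calculate number of layers for this stage
--         stage_layer_count = layers_per_stage
--         if stage_idx < extra_layers:
--             stage_layer_count += 1
--
--         # First stage: add embeddings if requested
--         if stage_idx == 0 and include_embeddings:
--             stage_modules.append(f"{fqn_prefix}embed_tokens")
--
--         # Add transformer layers for this stage
--         for _ in range(stage_layer_count):
--             stage_modules.append(f"{fqn_prefix}layers.{current_layer}")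
--             current_layer += 1
--
--         # Last stage: add norm and lm_head if requested
--         if stage_idx == num_stages - 1:
--             stage_modules.append(f"{fqn_prefix}norm")
--             if include_lm_head:
--                 stage_modules.append("lm_head")
--
--         if include_rotary_emb:
--             # Always include rotary_emb in all stages (it's needed for position embeddings)
--             stage_modules.append(f"{fqn_prefix}rotary_emb")
--
--         module_names_per_stage.append(stage_modules)
--
--     return module_names_per_stage
-- ===== SOURCE B (Python) =====
-- def _split_layers(names, stages):
--     # Greedy ceiling-split: peel ceil(len(names)/stages) names off the front for
--     # each stage but the last; the last stage takes whatever remains.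
--     chunks = []
--     while stages > 1:
--         take = -(-len(names) // stages)
--         chunks.append(names[:take])
--         names = names[take:]
--         stages -= 1
--     chunks.append(names)
--     return chunks
--
--
-- def generate_hf_model_fqn_per_model_part(
--     num_stages,
--     num_layers,
--     include_embeddings=True,
--     include_lm_head=True,
--     include_rotary_emb=True,
--     fqn_prefix="model.",
-- ):
--     if num_stages < 1:
--         raise ValueError("Number of stages must be at least 1")
--     if num_stages > num_layers:
--         raise ValueError(f"Number of stages ({num_stages}) cannot exceed number of layers ({num_layers})")
--
--     names = [f"{fqn_prefix}layers.{i}" for i in range(num_layers)]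
--     stages = _split_layers(names, num_stages)
--     stages[-1] = stages[-1] + [f"{fqn_prefix}norm"] + (["lm_head"] if include_lm_head else [])
--     if include_embeddings:
--         stages[0] = [f"{fqn_prefix}embed_tokens"] + stages[0]
--     if include_rotary_emb:
--         stages = [mods + [f"{fqn_prefix}rotary_emb"] for mods in stages]
--     return stages
-- ===== Notes on version B (the rewrite author's own statement) =====
-- stated objective: alternative
-- what changed: B works in staged passes instead of A's single stateful stage loop: it materialises the full list of layer names once, partitions that list with a greedy ceiling-split (each step peels ceil(remaining/stages_left) names off the front), and then decorates first/last/all chunks in separate passes; there is no divmod-based per-stage size formula and no running layer counter.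
import Mathlib
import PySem

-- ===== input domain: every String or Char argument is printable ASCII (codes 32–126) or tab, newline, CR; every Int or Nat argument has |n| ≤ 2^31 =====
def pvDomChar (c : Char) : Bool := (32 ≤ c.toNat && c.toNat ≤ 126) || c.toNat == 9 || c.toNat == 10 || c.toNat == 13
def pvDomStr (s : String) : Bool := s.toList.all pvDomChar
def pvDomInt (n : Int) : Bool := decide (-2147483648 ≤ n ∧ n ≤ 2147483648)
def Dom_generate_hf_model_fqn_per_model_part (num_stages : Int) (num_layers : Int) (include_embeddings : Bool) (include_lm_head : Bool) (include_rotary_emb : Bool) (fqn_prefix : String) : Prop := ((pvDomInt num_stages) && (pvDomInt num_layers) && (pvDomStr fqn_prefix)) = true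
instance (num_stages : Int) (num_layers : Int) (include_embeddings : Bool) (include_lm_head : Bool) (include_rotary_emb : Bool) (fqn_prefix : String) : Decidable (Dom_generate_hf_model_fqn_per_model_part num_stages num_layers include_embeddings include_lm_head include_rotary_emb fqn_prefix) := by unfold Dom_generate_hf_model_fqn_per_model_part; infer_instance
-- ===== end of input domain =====

-- B builds the full layer-name list once, partitions it by a recursive greedy
-- ceiling-split (no running counter, no divmod size formula), then decorates the
-- first/last/all chunks in separate passes; same output as A, similar cost.

-- ===== PORT A =====
-- Loop body of A's stage loop (state: built list of stages, current_layer).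
def pvAStep (num_stages layers_per_stage extra_layers : Int) (include_embeddings include_lm_head include_rotary_emb : Bool) (fqn_prefix : String) (st : List (List String) × Int) (stage_idx : Int) : List (List String) × Int :=
  let stage_layer_count := layers_per_stage + (if stage_idx < extra_layers then (1 : Int) else 0)
  let stage_modules : List String :=
    if stage_idx == 0 && include_embeddings then [fqn_prefix ++ "embed_tokens"] else []
  let inner := (PySem.List.pyRange 0 stage_layer_count 1).foldl
    (fun (s : List String × Int) _ => (s.1 ++ [fqn_prefix ++ "layers." ++ PySem.Int.toStr s.2], s.2 + 1))
    (stage_modules, st.2)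
  let sm2 := if stage_idx == num_stages - 1 then
      inner.1 ++ [fqn_prefix ++ "norm"] ++ (if include_lm_head then ["lm_head"] else [])
    else inner.1
  let sm3 := if include_rotary_emb then sm2 ++ [fqn_prefix ++ "rotary_emb"] else sm2
  (st.1 ++ [sm3], inner.2)

def generate_hf_model_fqn_per_model_part (num_stages : Int) (num_layers : Int) (include_embeddings : Bool) (include_lm_head : Bool) (include_rotary_emb : Bool) (fqn_prefix : String) : List (List String) :=
  if num_stages < 1 then []            -- Python raises ValueError here (outside Pre_)
  else if num_stages > num_layers then []   -- Python raises ValueError here (outside Pre_)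
  else
    let layers_per_stage := PySem.Int.floordiv num_layers num_stages
    let extra_layers := PySem.Int.mod num_layers num_stages
    ((PySem.List.pyRange 0 num_stages 1).foldl
      (pvAStep num_stages layers_per_stage extra_layers include_embeddings include_lm_head include_rotary_emb fqn_prefix)
      ([], 0)).1

-- ===== PORT B =====
-- Source B's `_split_layers` while loop (state: chunks, names, stages); the loop runs
-- while stages > 1, peeling the first ceil(len/stages) names, then appends the rest.
def pvSplitGo : List (List String) → List String → Nat → List (List String)
  | chunks, names, 0 => chunks ++ [names]
  | chunks, names, 1 => chunks ++ [names]
  | chunks, names, (s+2) =>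
      let take := -(PySem.Int.floordiv (-(PySem.List.len names)) ((s+2 : Nat) : Int))
      pvSplitGo (chunks ++ [PySem.List.slice names none (some take)])
        (PySem.List.slice names (some take) none) (s+1)

def generate_hf_model_fqn_per_model_part_alt (num_stages : Int) (num_layers : Int) (include_embeddings : Bool) (include_lm_head : Bool) (include_rotary_emb : Bool) (fqn_prefix : String) : List (List String) :=
  if num_stages < 1 then []
  else if num_stages > num_layers then []
  else
    let names := (PySem.List.pyRange 0 num_layers 1).map (fun i => fqn_prefix ++ "layers." ++ PySem.Int.toStr i)
    let stages0 := pvSplitGo [] names num_stages.toNat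
    -- stages[-1] = stages[-1] + [norm] + (lm_head?)
    let stages1 := stages0.dropLast ++
      ((stages0.getLast?).map (fun c => c ++ [fqn_prefix ++ "norm"] ++ (if include_lm_head then ["lm_head"] else []))).toList
    -- stages[0] = [embed_tokens] + stages[0]
    let stages2 := if include_embeddings then
        (match stages1 with
         | [] => []
         | c :: rest => ((fqn_prefix ++ "embed_tokens") :: c) :: rest)
      else stages1
    if include_rotary_emb then stages2.map (fun mods => mods ++ [fqn_prefix ++ "rotary_emb"]) else stages2

-- ===== PRECONDITION & SPEC =====
-- Pre_ excludes exactly the inputs where A raises ValueError: num_stages < 1 or num_stages > num_layers.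
def Pre_generate_hf_model_fqn_per_model_part (num_stages : Int) (num_layers : Int) (include_embeddings : Bool) (include_lm_head : Bool) (include_rotary_emb : Bool) (fqn_prefix : String) : Prop :=
  1 ≤ num_stages ∧ num_stages ≤ num_layers
instance (num_stages : Int) (num_layers : Int) (include_embeddings : Bool) (include_lm_head : Bool) (include_rotary_emb : Bool) (fqn_prefix : String) : Decidable (Pre_generate_hf_model_fqn_per_model_part num_stages num_layers include_embeddings include_lm_head include_rotary_emb fqn_prefix) := by unfold Pre_generate_hf_model_fqn_per_model_part; infer_instance

def pvWitness_generate_hf_model_fqn_per_model_part : Int × Int × Bool × Bool × Bool × String := (2, 5, true, true, true, "model.")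

def Spec_generate_hf_model_fqn_per_model_part (num_stages : Int) (num_layers : Int) (include_embeddings : Bool) (include_lm_head : Bool) (include_rotary_emb : Bool) (fqn_prefix : String) (out : List (List String)) : Prop := out = generate_hf_model_fqn_per_model_part_alt num_stages num_layers include_embeddings include_lm_head include_rotary_emb fqn_prefix
instance (num_stages : Int) (num_layers : Int) (include_embeddings : Bool) (include_lm_head : Bool) (include_rotary_emb : Bool) (fqn_prefix : String) (out : List (List String)) : Decidable (Spec_generate_hf_model_fqn_per_model_part num_stages num_layers include_embeddings include_lm_head include_rotary_emb fqn_prefix out) := by unfold Spec_generate_hf_model_fqn_per_model_part; infer_instance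

-- ===== CLAIM (what is proved, stated in full; the proofs are below) =====
def Claim_equal_generate_hf_model_fqn_per_model_part : Prop := ∀ (num_stages : Int) (num_layers : Int) (include_embeddings : Bool) (include_lm_head : Bool) (include_rotary_emb : Bool) (fqn_prefix : String), Dom_generate_hf_model_fqn_per_model_part num_stages num_layers include_embeddings include_lm_head include_rotary_emb fqn_prefix → Pre_generate_hf_model_fqn_per_model_part num_stages num_layers include_embeddings include_lm_head include_rotary_emb fqn_prefix → Spec_generate_hf_model_fqn_per_model_part num_stages num_layers include_embeddings include_lm_head include_rotary_emb fqn_prefix (generate_hf_model_fqn_per_model_part num_stages num_layers include_embeddings include_lm_head include_rotary_emb fqn_prefix)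

-- ===== LEMMAS AND PROOFS =====

-- Recursive characterisation of the greedy split (proof-side only).
def pvSplitLayers : List String → Nat → List (List String)
  | _, 0 => []
  | names, 1 => [names]
  | names, (s+2) =>
      let take := -(PySem.Int.floordiv (-(PySem.List.len names)) ((s+2 : Nat) : Int))
      PySem.List.slice names none (some take) :: pvSplitLayers (PySem.List.slice names (some take) none) (s+1)

-- The while loop of `_split_layers` is the recursive greedy split prefixed by the
-- chunks accumulated so far.
theorem pvSplitGo_eq (s : Nat) (hs : 1 ≤ s) :
    ∀ (chunks : List (List String)) (names : List String),
    pvSplitGo chunks names s = chunks ++ pvSplitLayers names s := by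
  induction s with
  | zero => omega
  | succ k ih =>
    cases k with
    | zero => intro chunks names; rfl
    | succ m =>
      intro chunks names
      show pvSplitGo (chunks ++ [_]) _ (m + 1) = _
      rw [ih (by omega), List.append_assoc]
      rfl

-- The layer-name sublist for the index range [a, b).
def pvNames (pfx : String) (a b : Int) : List String :=
  (PySem.List.pyRange a b 1).map (fun j => pfx ++ "layers." ++ PySem.Int.toStr j)

-- The module list of stage i, written pointwise (closed-form layer range plus the
-- three decorations); both ports are reduced to a map of this function.
def pvStagePt (num_stages q r : Int) (e l ro : Bool) (pfx : String) (i : Int) : List String :=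
  let core := pvNames pfx (i * q + min i r) ((i + 1) * q + min (i + 1) r)
  let m1 := if i == num_stages - 1 then
      core ++ [pfx ++ "norm"] ++ (if l then ["lm_head"] else [])
    else core
  let m2 := if i == 0 && e then (pfx ++ "embed_tokens") :: m1 else m1
  if ro then m2 ++ [pfx ++ "rotary_emb"] else m2

-- A's inner layer loop, run c times from counter cur, appends exactly the names of
-- the layer range [cur, cur + c) and leaves the counter at cur + c.
theorem pvInner (fqn_prefix : String) (c : Nat) (acc : List String) (cur : Int) :
    (PySem.List.pyRange 0 (c : Int) 1).foldl
      (fun (s : List String × Int) _ => (s.1 ++ [fqn_prefix ++ "layers." ++ PySem.Int.toStr s.2], s.2 + 1))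
      (acc, cur)
    = (acc ++ pvNames fqn_prefix cur (cur + (c : Int)), cur + (c : Int)) := by
  induction c generalizing acc cur with
  | zero => simp [PySem.List.pyRange_one_eq_nil, pvNames]
  | succ n ih =>
    push_cast
    rw [PySem.List.pyRange_one_succ_right (by positivity), List.foldl_append, ih,
        show cur + ((n : Int) + 1) = (cur + (n : Int)) + 1 by ring]
    simp only [List.foldl_cons, List.foldl_nil, pvNames]
    rw [PySem.List.pyRange_one_succ_right (by omega)]
    simp

-- One stage of A, started at the closed-form counter, produces the pointwise stage
-- and moves the counter to the next closed-form value.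
theorem pvStage (num_stages q r : Int) (e l ro : Bool) (pfx : String)
    (hq : 0 ≤ q) (i : Int) (acc : List (List String)) :
    pvAStep num_stages q r e l ro pfx (acc, i * q + min i r) i
    = (acc ++ [pvStagePt num_stages q r e l ro pfx i], (i + 1) * q + min (i + 1) r) := by
  have hc : 0 ≤ q + (if i < r then (1 : Int) else 0) := by split <;> omega
  have hcast : ((q + (if i < r then (1 : Int) else 0)).toNat : Int)
      = q + (if i < r then (1 : Int) else 0) := Int.toNat_of_nonneg hc
  have hend : i * q + min i r + (q + (if i < r then (1 : Int) else 0))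
      = (i + 1) * q + min (i + 1) r := by rw [add_mul, one_mul]; split <;> omega
  unfold pvAStep pvStagePt
  simp only
  rw [← hcast, pvInner, hcast, hend]
  refine Prod.ext ?_ rfl
  simp only
  by_cases he : (i == 0 && e) = true <;> by_cases hl : (i == num_stages - 1) = true <;>
    simp [he, hl]

-- Folding A's stage loop over the first k stages yields the pointwise stages and the
-- closed-form counter.
theorem pvOuter (num_stages q r : Int) (e l ro : Bool) (pfx : String)
    (hq : 0 ≤ q) (hr : 0 ≤ r) (k : Nat) :
    (PySem.List.pyRange 0 (k : Int) 1).foldl (pvAStep num_stages q r e l ro pfx) ([], 0)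
    = ((PySem.List.pyRange 0 (k : Int) 1).map (pvStagePt num_stages q r e l ro pfx),
       (k : Int) * q + min (k : Int) r) := by
  induction k with
  | zero => simp [PySem.List.pyRange_one_eq_nil]; omega
  | succ n ih =>
    push_cast
    rw [PySem.List.pyRange_one_succ_right (by positivity), List.foldl_append, ih,
        List.map_append]
    simp only [List.foldl_cons, List.foldl_nil, List.map_cons, List.map_nil]
    rw [pvStage num_stages q r e l ro pfx hq (n : Int)]

-- B's greedy ceiling-split of the layer names of [start, start + (s*q + r)) into s
-- chunks produces exactly the closed-form layer ranges of the s stages.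
theorem pvNames_append (pfx : String) (a m b : Int) (h1 : a ≤ m) (h2 : m ≤ b) :
    pvNames pfx a b = pvNames pfx a m ++ pvNames pfx m b := by
  unfold pvNames
  rw [PySem.List.pyRange_one_append a m b h1 h2, List.map_append]

theorem pvNames_length (pfx : String) (a b : Int) (h : a ≤ b) :
    (pvNames pfx a b).length = (b - a).toNat := by
  unfold pvNames
  rw [List.length_map, PySem.List.length_pyRange_one]

theorem pvRangeShift (a b : Int) :
    PySem.List.pyRange (a + 1) (b + 1) 1 = (PySem.List.pyRange a b 1).map (· + 1) := by
  rw [PySem.List.pyRange_one, PySem.List.pyRange_one, List.map_map,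
      show b + 1 - (a + 1) = b - a by ring]
  apply List.map_congr_left
  intro x _
  simp only [Function.comp_apply]
  ring

theorem pvNames_congr (pfx : String) {a b a' b' : Int} (h1 : a = a') (h2 : b = b') :
    pvNames pfx a b = pvNames pfx a' b' := by rw [h1, h2]

theorem pvGreedy (pfx : String) : ∀ (s : Nat), 1 ≤ s →
    ∀ (q r start : Int), 0 ≤ q → 0 ≤ r → r < (s : Int) →
    pvSplitLayers (pvNames pfx start (start + ((s : Int) * q + r))) s
    = (PySem.List.pyRange 0 (s : Int) 1).map
        (fun i => pvNames pfx (start + i * q + min i r) (start + (i + 1) * q + min (i + 1) r)) := by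
  intro s
  induction s with
  | zero => intro h; omega
  | succ k ih =>
    cases k with
    | zero =>
      -- s = 1, so r = 0
      intro _ q r start hq hr hrs
      have hr0 : r = 0 := by omega
      subst hr0
      have hone : ((0 + 1 : Nat) : Int) = 1 := by norm_num
      have hrange : PySem.List.pyRange 0 ((0 + 1 : Nat) : Int) 1 = [0] := by
        rw [hone, show (1 : Int) = 0 + 1 by norm_num]
        exact PySem.List.pyRange_one_singleton 0
      rw [hrange, List.map_cons, List.map_nil,
          show (start + 0 * q + min 0 0 : Int) = start by omega,
          show (start + (0 + 1) * q + min (0 + 1) 0 : Int) = start + (((0 + 1 : Nat) : Int) * q + 0) by rw [hone]; norm_num]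
      rfl
    | succ m =>
      -- s = m + 2
      intro _ q r start hq hr hrs
      have hM : ((m + 2 : Nat) : Int) = (m : Int) + 2 := by push_cast; ring
      have hMpos : (0 : Int) < ((m + 2 : Nat) : Int) := by rw [hM]; positivity
      set n : Int := ((m + 2 : Nat) : Int) * q + r with hn
      have hn0 : 0 ≤ n := by rw [hn]; have : 0 ≤ ((m + 2 : Nat) : Int) * q := by positivity
                             omega
      -- the size of the first greedy chunk
      set t : Int := q + (if 0 < r then (1 : Int) else 0) with ht
      have ht0 : 0 ≤ t := by rw [ht]; split <;> omega
      have htn : t ≤ n := by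
        rw [ht, hn, hM]
        have h1 : ((m : Int) + 2) * q = q + ((m : Int) + 1) * q := by ring
        have h2 : 0 ≤ ((m : Int) + 1) * q := by positivity
        split <;> omega
      have hlen : PySem.List.len (pvNames pfx start (start + n)) = n := by
        rw [PySem.List.len_eq, pvNames_length pfx _ _ (by omega),
            show start + n - start = n by ring, Int.toNat_of_nonneg hn0]
      have htake : -(PySem.Int.floordiv (-(PySem.List.len (pvNames pfx start (start + n)))) ((m + 2 : Nat) : Int)) = t := by
        rw [hlen, PySem.Int.neg_floordiv_neg_eq_iff_of_pos hMpos, hn, hM, ht]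
        constructor
        · have h1 : (q + (if 0 < r then (1:Int) else 0) - 1) * ((m:Int) + 2)
              = q * ((m:Int) + 2) + ((if 0 < r then (1:Int) else 0) - 1) * ((m:Int) + 2) := by ring
          have h2 : ((m : Int) + 2) * q = q * ((m:Int) + 2) := by ring
          rw [h1, h2]
          split <;> nlinarith
        · have h1 : (q + (if 0 < r then (1:Int) else 0)) * ((m:Int) + 2)
              = q * ((m:Int) + 2) + (if 0 < r then (1:Int) else 0) * ((m:Int) + 2) := by ring
          have h2 : ((m : Int) + 2) * q = q * ((m:Int) + 2) := by ring
          rw [h1, h2]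
          split <;> nlinarith
      -- split the name list at the first boundary
      have hsplitN : pvNames pfx start (start + n)
          = pvNames pfx start (start + t) ++ pvNames pfx (start + t) (start + n) :=
        pvNames_append pfx _ _ _ (by omega) (by omega)
      have hlen1 : (pvNames pfx start (start + t)).length = t.toNat := by
        rw [pvNames_length pfx _ _ (by omega), show start + t - start = t by ring]
      show (let take := -(PySem.Int.floordiv (-(PySem.List.len (pvNames pfx start (start + n)))) ((m + 2 : Nat) : Int));
        PySem.List.slice (pvNames pfx start (start + n)) none (some take)
          :: pvSplitLayers (PySem.List.slice (pvNames pfx start (start + n)) (some take) none) (m + 1)) = _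
      simp only [htake]
      rw [PySem.List.slice_to _ ht0, PySem.List.slice_from _ ht0, hsplitN,
          List.take_left' hlen1, List.drop_left' hlen1]
      -- recursive call via the induction hypothesis
      have hrest : start + n = (start + t) + (((m + 1 : Nat) : Int) * q + (r - (if 0 < r then 1 else 0))) := by
        rw [hn, ht]; push_cast; ring
      rw [hrest, ih (by omega) q (r - (if 0 < r then 1 else 0)) (start + t)
            hq (by split <;> omega) (by push_cast; split <;> omega)]
      -- assemble: stage 0 followed by the reindexed remaining m+1 stages
      rw [PySem.List.pyRange_one_cons (show (0:Int) < ((m + 2 : Nat) : Int) by push_cast; positivity),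
          List.map_cons]
      congr 1
      · exact pvNames_congr pfx (by omega) (by rw [ht]; split_ifs <;> omega)
      · rw [show ((m + 2 : Nat) : Int) = ((m + 1 : Nat) : Int) + 1 from by push_cast; ring,
            pvRangeShift 0 ((m + 1 : Nat) : Int), List.map_map]
        apply List.map_congr_left
        intro i hi
        have hi0 : 0 ≤ i := ((PySem.List.mem_pyRange_one).mp hi).1
        simp only [Function.comp_apply]
        apply pvNames_congr pfx
        · rw [show min (i + 1) r
              = (if 0 < r then (1:Int) else 0) + min i (r - (if 0 < r then 1 else 0)) from by split_ifs <;> omega,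
              ht]
          ring
        · rw [show min (i + 1 + 1) r
              = (if 0 < r then (1:Int) else 0) + min (i + 1) (r - (if 0 < r then 1 else 0)) from by split_ifs <;> omega,
              ht]
          ring

-- Appending `tail` to the last element of the mapped stage list is a pointwise
-- rewrite on the index range.
theorem pvTailDec (ns : Int) (hns : 0 < ns) (g : Int → List String) (tail : List String) :
    (((PySem.List.pyRange 0 ns 1).map g).dropLast ++
      ((((PySem.List.pyRange 0 ns 1).map g).getLast?).map (fun c => c ++ tail)).toList)
    = (PySem.List.pyRange 0 ns 1).map (fun i => if i == ns - 1 then g i ++ tail else g i) := by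
  have hsplit : PySem.List.pyRange 0 ns 1 = PySem.List.pyRange 0 (ns - 1) 1 ++ [ns - 1] := by
    have h := PySem.List.pyRange_one_succ_right (a := 0) (b := ns - 1) (by omega)
    rw [show ns - 1 + 1 = ns from by ring] at h
    exact h
  rw [hsplit, List.map_append, List.map_append, List.map_cons, List.map_nil,
      List.map_cons, List.map_nil, List.dropLast_concat, List.getLast?_concat]
  simp only [Option.map_some, Option.toList_some]
  rw [show (if ((ns - 1 : Int) == ns - 1) = true then g (ns - 1) ++ tail else g (ns - 1))
        = g (ns - 1) ++ tail from by simp]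
  congr 1
  apply List.map_congr_left
  intro i hi
  have hlt := (PySem.List.mem_pyRange_one.mp hi).2
  rw [if_neg (by simp; omega)]

-- Prepending `x` to the first element of the mapped stage list is a pointwise
-- rewrite on the index range.
theorem pvHeadDec (ns : Int) (hns : 0 < ns) (g : Int → List String) (x : String) :
    (match (PySem.List.pyRange 0 ns 1).map g with
     | [] => ([] : List (List String))
     | c :: rest => (x :: c) :: rest)
    = (PySem.List.pyRange 0 ns 1).map (fun i => if i == 0 then x :: g i else g i) := by
  rw [PySem.List.pyRange_one_cons hns, List.map_cons, List.map_cons]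
  simp only []
  rw [show (if ((0 : Int) == 0) = true then x :: g 0 else g 0) = x :: g 0 from by simp]
  congr 1
  apply List.map_congr_left
  intro i hi
  have hge := (PySem.List.mem_pyRange_one.mp hi).1
  rw [if_neg (by simp; omega)]

-- ===== VERDICT (by name: the statement is the Claim_ definition above) =====
theorem generate_hf_model_fqn_per_model_part_spec : Claim_equal_generate_hf_model_fqn_per_model_part := by
  intro ns nl e l ro pfx _hdom hpre
  obtain ⟨h1, h2⟩ := hpre
  have hns : ¬ ns < 1 := by omega
  have hnl : ¬ ns > nl := by omega
  have hnspos : (0 : Int) < ns := by omega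
  unfold Spec_generate_hf_model_fqn_per_model_part
  unfold generate_hf_model_fqn_per_model_part generate_hf_model_fqn_per_model_part_alt
  simp only [hns, hnl, if_false]
  set q := PySem.Int.floordiv nl ns with hqdef
  set r := PySem.Int.mod nl ns with hrdef
  have hq : 0 ≤ q := by
    rw [hqdef, PySem.Int.le_floordiv_iff_mul_le hnspos]; omega
  have hr0 : 0 ≤ r := PySem.Int.mod_nonneg nl hnspos
  have hrlt : r < ns := PySem.Int.mod_lt nl hnspos
  have hsum : q * ns + r = nl := PySem.Int.floordiv_mul_add_mod nl ns
  have hk : ((ns.toNat : Nat) : Int) = ns := Int.toNat_of_nonneg (by omega)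
  -- A's loop produces the pointwise stages
  have hAfold := pvOuter ns q r e l ro pfx hq hr0 ns.toNat
  rw [hk] at hAfold
  rw [hAfold]
  -- B's split produces the closed-form layer ranges
  have hB := pvGreedy pfx ns.toNat (by omega) q r 0 hq hr0 (by rw [hk]; exact hrlt)
  rw [hk] at hB
  rw [show (PySem.List.pyRange 0 nl 1).map (fun i => pfx ++ "layers." ++ PySem.Int.toStr i)
        = pvNames pfx 0 (0 + (ns * q + r)) from by
      unfold pvNames
      rw [show (0 + (ns * q + r) : Int) = nl from by rw [mul_comm]; linarith [hsum]]]
  rw [pvSplitGo_eq ns.toNat (by omega), List.nil_append, hB]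
  -- the three decorations are pointwise rewrites
  rw [show (fun i => pvNames pfx (0 + i * q + min i r) (0 + (i + 1) * q + min (i + 1) r))
        = (fun i => pvNames pfx (i * q + min i r) ((i + 1) * q + min (i + 1) r)) from by
      funext i; rw [zero_add, zero_add]]
  rw [show (fun c => c ++ [pfx ++ "norm"] ++ (if l then ["lm_head"] else []))
        = (fun c : List String => c ++ ([pfx ++ "norm"] ++ (if l then ["lm_head"] else []))) from by
      funext c; rw [List.append_assoc]]
  rw [pvTailDec ns hnspos _ ([pfx ++ "norm"] ++ (if l then ["lm_head"] else []))]
  cases e with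
  | true =>
    rw [if_pos (show (true = true) from rfl)]
    rw [pvHeadDec ns hnspos _ (pfx ++ "embed_tokens")]
    cases ro with
    | true =>
      rw [if_pos (show (true = true) from rfl)]
      rw [List.map_map]
      apply List.map_congr_left
      intro i hi
      simp only [Function.comp_apply, pvStagePt, Bool.and_true]
      by_cases h0 : (i == 0) = true <;> by_cases hL : (i == ns - 1) = true <;>
        simp [h0, hL]
    | false =>
      rw [if_neg (show ¬ (false = true) from by simp)]
      apply List.map_congr_left
      intro i hi
      simp only [pvStagePt, Bool.and_true]
      by_cases h0 : (i == 0) = true <;> by_cases hL : (i == ns - 1) = true <;>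
        simp [h0, hL]
  | false =>
    rw [if_neg (show ¬ (false = true) from by simp)]
    cases ro with
    | true =>
      rw [if_pos (show (true = true) from rfl)]
      rw [List.map_map]
      apply List.map_congr_left
      intro i hi
      simp only [Function.comp_apply, pvStagePt, Bool.and_false]
      by_cases hL : (i == ns - 1) = true <;> simp [hL]
    | false =>
      rw [if_neg (show ¬ (false = true) from by simp)]
      apply List.map_congr_left
      intro i hi
      simp only [pvStagePt, Bool.and_false]
      by_cases hL : (i == ns - 1) = true <;> simp [hL]
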